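-- pv_equiv track=rewrite | github.com/Peace-Song/College_material | SPLIT/assignments/meeting_3/phase_1_harry_potter.py | count_keyword
-- ===== SOURCE A (Python) =====
-- def count_keyword(sentences, keyword):
--   # NOTE: Implement this function.
--   keyword_count = 0
--   for sentence in sentences:
--     split_sentence = sentence.split()
--
--     for word in split_sentence:
--       if keyword == word:
--         keyword_count += 1
--
--   return keyword_count
-- ===== SOURCE B (Python) =====
-- def count_keyword(sentences, keyword):
--     # Flatten all words, build a full frequency table once, then look the keyword up.
--     words = [w for s in sentences for w in s.split()]
--     freq = {}
--     for w in words: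
--         freq[w] = freq.get(w, 0) + 1
--     return freq.get(keyword, 0)
-- ===== Notes on version B (the rewrite author's own statement) =====
-- stated objective: idiomatic
-- what changed: B flattens all words into one list and builds a full word-frequency dictionary in a single pass, then reads the keyword's entry (0 if absent), instead of A's nested targeted-comparison loop keeping a single running counter.
import Mathlib
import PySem

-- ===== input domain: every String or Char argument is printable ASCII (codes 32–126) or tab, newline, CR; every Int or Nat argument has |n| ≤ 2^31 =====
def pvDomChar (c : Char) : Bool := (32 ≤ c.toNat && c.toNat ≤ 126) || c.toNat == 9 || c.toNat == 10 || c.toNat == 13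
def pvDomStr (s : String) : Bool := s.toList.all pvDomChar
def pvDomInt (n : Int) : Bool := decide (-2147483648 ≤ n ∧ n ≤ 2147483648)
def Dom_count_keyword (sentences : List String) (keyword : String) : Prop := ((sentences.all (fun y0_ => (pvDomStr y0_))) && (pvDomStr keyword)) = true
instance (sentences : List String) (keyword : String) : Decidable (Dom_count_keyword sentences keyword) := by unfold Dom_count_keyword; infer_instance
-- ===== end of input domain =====

-- B builds a full word-frequency dictionary over the flattened word list and looks the keyword up (idiomatic histogram-then-lookup), instead of A's nested targeted scan.


-- ===== PORT A =====
def count_keyword (sentences : List String) (keyword : String) : Int :=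
  sentences.foldl
    (fun keyword_count sentence =>
      (PySem.Str.split₀ sentence).foldl
        (fun acc word => if keyword == word then acc + 1 else acc)
        keyword_count)
    0

-- ===== PORT B =====
def count_keyword_alt (sentences : List String) (keyword : String) : Int :=
  let words := sentences.flatMap (fun s => PySem.Str.split₀ s)
  let freq := words.foldl (fun d w => d.insert w (d.getD w 0 + 1)) PySem.Dict.empty
  freq.getD keyword 0

-- ===== PRECONDITION & SPEC =====
def Spec_count_keyword (sentences : List String) (keyword : String) (out : Int) : Prop := out = count_keyword_alt sentences keyword
instance (sentences : List String) (keyword : String) (out : Int) : Decidable (Spec_count_keyword sentences keyword out) := by unfold Spec_count_keyword; infer_instance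

-- ===== CLAIM (what is proved, stated in full; the proofs are below) =====
def Claim_equal_count_keyword : Prop := ∀ (sentences : List String) (keyword : String), Dom_count_keyword sentences keyword → Spec_count_keyword sentences keyword (count_keyword sentences keyword)

-- ===== LEMMAS AND PROOFS =====

-- A's nested loop accumulates the count of the keyword over the flattened word list.
theorem count_keyword_eq_count (sentences : List String) (keyword : String) (a : Int) :
    sentences.foldl
      (fun keyword_count sentence =>
        (PySem.Str.split₀ sentence).foldl
          (fun acc word => if keyword == word then acc + 1 else acc)
          keyword_count)
      a
    = a + ((sentences.flatMap (fun s => PySem.Str.split₀ s)).count keyword : Int) := by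
  induction sentences generalizing a with
  | nil => simp
  | cons s rest ih =>
    simp only [List.foldl_cons, List.flatMap_cons, List.count_append, ih]
    have hc : ∀ x : String, (keyword == x) = (x == keyword) := fun x => by
      simp [eq_comm]
    simp only [hc, PySem.List.foldl_beq_add_one]
    push_cast
    ring

-- ===== VERDICT (by name: the statement is the Claim_ definition above) =====
theorem count_keyword_spec : Claim_equal_count_keyword := by
  intro sentences keyword _
  unfold Spec_count_keyword count_keyword count_keyword_alt
  rw [count_keyword_eq_count]
  simp [PySem.Dict.getD_foldl_insert_add_one]
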